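-- pv_equiv track=rewrite | github.com/lukehamond1001-alt/PowerCNNSeparator | segdata.py | _strip_and_label
-- ===== SOURCE A (Python) =====
-- def _strip_and_label(
--     text: str,
--     vocab: dict,
-- ) -> tuple[list[int], list[int], list[int], list[int]]:
--     """
--     Strip spaces/newlines from text and record where word boundaries were.
--
--     Returns:
--       ids        — non-space char IDs (length L)
--       boundaries — 0/1 flags, length L-1
--                    boundaries[i] = 1  iff there was whitespace between
--                    ids[i] and ids[i+1] in the original text
--       left_lens  — length of the word to the LEFT  of each boundary (length L-1)
--       right_lens — length of the word to the RIGHT of each boundary (length L-1)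
--     """
--     words = text.replace('\n', ' ').split()
--
--     ids        = []
--     word_idxs  = []
--     for wi, w in enumerate(words):
--         for c in w:
--             ids.append(vocab.get(c, 0))
--             word_idxs.append(wi)
--
--     word_lens  = [len(w) for w in words]
--     boundaries = [1 if word_idxs[i] != word_idxs[i + 1] else 0
--                   for i in range(len(ids) - 1)]
--     left_lens  = [word_lens[word_idxs[i]]     for i in range(len(ids) - 1)]
--     right_lens = [word_lens[word_idxs[i + 1]] for i in range(len(ids) - 1)]
--
--     return ids, boundaries, left_lens, right_lens
-- ===== SOURCE B (Python) =====
-- def _strip_and_label(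
--     text: str,
--     vocab: dict,
-- ) -> tuple[list[int], list[int], list[int], list[int]]:
--     # One word-by-word pass: build all four lists inline, tracking only the
--     # previous word's length; no word_idxs array, no index-range comprehensions.
--     ids, boundaries, left_lens, right_lens = [], [], [], []
--     prev_len = 0
--     for wi, word in enumerate(text.replace('\n', ' ').split()):
--         L = len(word)
--         for k, c in enumerate(word):
--             ids.append(vocab.get(c, 0))
--             if k > 0:
--                 boundaries.append(0)
--                 left_lens.append(L)
--                 right_lens.append(L)
--             elif wi > 0:
--                 boundaries.append(1)
--                 left_lens.append(prev_len)
--                 right_lens.append(L)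
--         prev_len = L
--     return ids, boundaries, left_lens, right_lens
-- ===== Notes on version B (the rewrite author's own statement) =====
-- stated objective: simpler
-- what changed: Single word-by-word pass that appends to all four output lists inline while tracking only the previous word's length, instead of building a parallel word_idxs array and then deriving boundaries/left/right via three index-range comprehensions.
import Mathlib
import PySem

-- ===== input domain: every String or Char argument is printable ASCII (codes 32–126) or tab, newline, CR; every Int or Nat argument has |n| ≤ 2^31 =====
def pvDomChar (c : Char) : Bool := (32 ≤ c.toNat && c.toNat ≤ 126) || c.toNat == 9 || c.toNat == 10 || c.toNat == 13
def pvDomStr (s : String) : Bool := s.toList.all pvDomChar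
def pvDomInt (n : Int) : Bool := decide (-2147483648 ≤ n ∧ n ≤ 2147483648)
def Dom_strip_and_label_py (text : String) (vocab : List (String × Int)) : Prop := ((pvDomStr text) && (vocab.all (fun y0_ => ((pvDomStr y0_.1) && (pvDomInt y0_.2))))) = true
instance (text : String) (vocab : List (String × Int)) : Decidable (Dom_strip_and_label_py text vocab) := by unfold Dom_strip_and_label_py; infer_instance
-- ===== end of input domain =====

-- B replaces A's parallel word_idxs array + three index-range comprehensions by a single
-- word-by-word pass that appends to all four output lists inline (objective: simpler).


-- ===== PORT A =====
def strip_and_label_py (text : String) (vocab : List (String × Int)) :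
    List Int × List Int × List Int × List Int :=
  let d := PySem.Dict.ofList vocab
  let words := PySem.Str.split₀ (PySem.Str.replace text "\n" " ")
  let p := (PySem.List.enumerate words).foldl
      (fun (p : List Int × List Int) wiw =>
        wiw.2.toList.foldl
          (fun (q : List Int × List Int) c =>
            (q.1 ++ [d.getD (String.ofList [c]) 0], q.2 ++ [wiw.1])) p)
      ([], [])
  let ids := p.1
  let word_idxs := p.2
  let word_lens := words.map (fun w => (PySem.Str.len w : Int))
  let boundaries := (List.range (ids.length - 1)).map
      (fun (i : Nat) => if PySem.List.pyGetD word_idxs (i : Int) 0 ≠ PySem.List.pyGetD word_idxs ((i : Int) + 1) 0 then (1 : Int) else 0)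
  let left_lens := (List.range (ids.length - 1)).map
      (fun (i : Nat) => PySem.List.pyGetD word_lens (PySem.List.pyGetD word_idxs (i : Int) 0) 0)
  let right_lens := (List.range (ids.length - 1)).map
      (fun (i : Nat) => PySem.List.pyGetD word_lens (PySem.List.pyGetD word_idxs ((i : Int) + 1) 0) 0)
  (ids, boundaries, left_lens, right_lens)

-- ===== PORT B =====
def strip_and_label_py_alt (text : String) (vocab : List (String × Int)) :
    List Int × List Int × List Int × List Int :=
  let d := PySem.Dict.ofList vocab
  let st := (PySem.List.enumerate (PySem.Str.split₀ (PySem.Str.replace text "\n" " "))).foldl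
      (fun (st : (List Int × List Int × List Int × List Int) × Int) wiw =>
        let L : Int := PySem.Str.len wiw.2
        let out := (PySem.List.enumerate wiw.2.toList).foldl
            (fun (o : List Int × List Int × List Int × List Int) kc =>
              let ids := o.1 ++ [d.getD (String.ofList [kc.2]) 0]
              if kc.1 > 0 then (ids, o.2.1 ++ [0], o.2.2.1 ++ [L], o.2.2.2 ++ [L])
              else if wiw.1 > 0 then (ids, o.2.1 ++ [1], o.2.2.1 ++ [st.2], o.2.2.2 ++ [L])
              else (ids, o.2.1, o.2.2.1, o.2.2.2)) st.1
        (out, L))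
      (([], [], [], []), 0)
  st.1

-- ===== PRECONDITION & SPEC =====
def Spec_strip_and_label_py (text : String) (vocab : List (String × Int)) (out : List Int × List Int × List Int × List Int) : Prop := out = strip_and_label_py_alt text vocab
instance (text : String) (vocab : List (String × Int)) (out : List Int × List Int × List Int × List Int) : Decidable (Spec_strip_and_label_py text vocab out) := by unfold Spec_strip_and_label_py; infer_instance

-- ===== CLAIM (what is proved, stated in full; the proofs are below) =====
def Claim_equal_strip_and_label_py : Prop := ∀ (text : String) (vocab : List (String × Int)), Dom_strip_and_label_py text vocab → Spec_strip_and_label_py text vocab (strip_and_label_py text vocab)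

-- ===== LEMMAS AND PROOFS =====

-- Proof-side abstractions of the two port bodies (lk abstracts the vocab lookup).
def pvInnerA (lk : Char → Int) (j : Int) (q : List Int × List Int) (c : Char) :
    List Int × List Int := (q.1 ++ [lk c], q.2 ++ [j])

def pvOuterA (lk : Char → Int) (p : List Int × List Int) (wiw : Int × String) :
    List Int × List Int := wiw.2.toList.foldl (pvInnerA lk wiw.1) p

def pvAfun (lk : Char → Int) (words : List String) : List Int × List Int × List Int × List Int :=
  let p := (PySem.List.enumerate words).foldl (pvOuterA lk) ([], [])
  let ids := p.1
  let word_idxs := p.2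
  let word_lens := words.map (fun w => (PySem.Str.len w : Int))
  let boundaries := (List.range (ids.length - 1)).map
      (fun (i : Nat) => if PySem.List.pyGetD word_idxs (i : Int) 0 ≠ PySem.List.pyGetD word_idxs ((i : Int) + 1) 0 then (1 : Int) else 0)
  let left_lens := (List.range (ids.length - 1)).map
      (fun (i : Nat) => PySem.List.pyGetD word_lens (PySem.List.pyGetD word_idxs (i : Int) 0) 0)
  let right_lens := (List.range (ids.length - 1)).map
      (fun (i : Nat) => PySem.List.pyGetD word_lens (PySem.List.pyGetD word_idxs ((i : Int) + 1) 0) 0)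
  (ids, boundaries, left_lens, right_lens)

def pvInnerB (lk : Char → Int) (L prev wi : Int)
    (o : List Int × List Int × List Int × List Int) (kc : Int × Char) :
    List Int × List Int × List Int × List Int :=
  let ids := o.1 ++ [lk kc.2]
  if kc.1 > 0 then (ids, o.2.1 ++ [0], o.2.2.1 ++ [L], o.2.2.2 ++ [L])
  else if wi > 0 then (ids, o.2.1 ++ [1], o.2.2.1 ++ [prev], o.2.2.2 ++ [L])
  else (ids, o.2.1, o.2.2.1, o.2.2.2)

def pvOuterB (lk : Char → Int)
    (st : (List Int × List Int × List Int × List Int) × Int) (wiw : Int × String) :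
    (List Int × List Int × List Int × List Int) × Int :=
  let L : Int := PySem.Str.len wiw.2
  ((PySem.List.enumerate wiw.2.toList).foldl (pvInnerB lk L st.2 wiw.1) st.1, L)

def pvBfun (lk : Char → Int) (words : List String) : List Int × List Int × List Int × List Int :=
  ((PySem.List.enumerate words).foldl (pvOuterB lk) (([], [], [], []), 0)).1

-- Canonical descriptions: ids, word-index list, adjacent-pair blocks, boundary/len blocks.
def pvIdsOf (lk : Char → Int) (ws : List String) : List Int :=
  ws.flatMap (fun w => w.toList.map lk)

def pvIdxFrom (k : Int) : List String → List Int
  | [] => []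
  | w :: t => List.replicate w.toList.length k ++ pvIdxFrom (k + 1) t

def pvApGo (k : Int) : List String → List (Int × Int)
  | [] => []
  | w :: t => List.replicate (w.toList.length - 1) (k, k) ++
      (match t with
       | [] => []
       | _ :: _ => (k, k + 1) :: pvApGo (k + 1) t)

def pvBl (prev : Int) : List String → List Int × List Int × List Int
  | [] => ([], [], [])
  | w :: t =>
    let L : Int := w.toList.length
    let r := pvBl L t
    ((1 :: List.replicate (w.toList.length - 1) 0) ++ r.1,
     (prev :: List.replicate (w.toList.length - 1) L) ++ r.2.1,
     (List.replicate w.toList.length L) ++ r.2.2)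

def pvTop : List String → List Int × List Int × List Int
  | [] => ([], [], [])
  | w :: t =>
    let L : Int := w.toList.length
    let r := pvBl L t
    (List.replicate (w.toList.length - 1) 0 ++ r.1,
     List.replicate (w.toList.length - 1) L ++ r.2.1,
     List.replicate (w.toList.length - 1) L ++ r.2.2)

def pvLast (prev : Int) : List String → Int
  | [] => prev
  | w :: t => pvLast (w.toList.length : Int) t

-- split() produces only nonempty words.
lemma pv_split0_go_ne_nil (s : List Char) : ∀ (cur : List Char) (acc : List (List Char)),
    (∀ w ∈ acc, w ≠ []) → ∀ w ∈ PySem.Chars.split₀.go s cur acc, w ≠ [] := by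
  induction s with
  | nil =>
    intro cur acc h w hw
    unfold PySem.Chars.split₀.go at hw
    split at hw
    · exact h w (List.mem_reverse.mp hw)
    · rcases List.mem_reverse.mp hw with h1 | h2
      · next he => simp_all [List.isEmpty_iff]
      · exact h w (by assumption)
  | cons c rest ih =>
    intro cur acc h w hw
    unfold PySem.Chars.split₀.go at hw
    split at hw
    · split at hw
      · exact ih [] acc h w hw
      · next he =>
        refine ih [] (cur.reverse :: acc) ?_ w hw
        intro v hv
        rcases List.mem_cons.mp hv with rfl | hv
        · simp_all [List.isEmpty_iff]
        · exact h v hv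
    · exact ih (c :: cur) acc h w hw

lemma pv_split0_ne_nil (s : String) : ∀ w ∈ PySem.Str.split₀ s, w.toList ≠ [] := by
  intro w hw
  unfold PySem.Str.split₀ at hw
  obtain ⟨cs, hcs, rfl⟩ := List.mem_map.mp hw
  have := pv_split0_go_ne_nil s.toList [] [] (by simp) cs hcs
  simpa using this

-- A's first loop builds ids and the word-index list.
lemma pvL1 (lk : Char → Int) (j : Int) : ∀ (cs : List Char) (q : List Int × List Int),
    cs.foldl (pvInnerA lk j) q = (q.1 ++ cs.map lk, q.2 ++ List.replicate cs.length j) := by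
  intro cs
  induction cs with
  | nil => intro q; simp
  | cons c cs ih => intro q; simp [pvInnerA, ih, List.replicate_succ]

lemma pvL2 (lk : Char → Int) : ∀ (ws : List String) (k : Int) (p : List Int × List Int),
    (PySem.List.enumerate ws k).foldl (pvOuterA lk) p
      = (p.1 ++ pvIdsOf lk ws, p.2 ++ pvIdxFrom k ws) := by
  intro ws
  induction ws with
  | nil => intro k p; simp [pvIdsOf, pvIdxFrom, PySem.List.enumerate_nil]
  | cons w t ih =>
    intro k p
    rw [PySem.List.enumerate_cons]
    simp only [List.foldl_cons]
    rw [show pvOuterA lk p (k, w) = (p.1 ++ w.toList.map lk, p.2 ++ List.replicate w.toList.length k)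
        from pvL1 lk k w.toList p]
    rw [ih]
    simp [pvIdsOf, pvIdxFrom]

lemma pvL3 (lk : Char → Int) : ∀ (ws : List String) (k : Int),
    (pvIdxFrom k ws).length = (pvIdsOf lk ws).length := by
  intro ws
  induction ws with
  | nil => intro k; rfl
  | cons w t ih => intro k; simp [pvIdxFrom, pvIdsOf, ih]

-- A's index-range comprehensions are zips of the word-index list with its tail.
lemma pvL4 {β : Type} (g : Int → Int → β) : ∀ (xs : List Int),
    (List.range (xs.length - 1)).map
        (fun (i : Nat) => g (PySem.List.pyGetD xs (i : Int) 0) (PySem.List.pyGetD xs ((i : Int) + 1) 0))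
      = List.zipWith g xs xs.tail := by
  intro xs
  induction xs with
  | nil => simp
  | cons a xs ih =>
    cases xs with
    | nil => simp
    | cons b t =>
      have hlen : (a :: b :: t).length - 1 = (b :: t).length - 1 + 1 := by simp
      rw [hlen, List.range_succ_eq_map, List.map_cons, List.map_map]
      have hhead : g (PySem.List.pyGetD (a :: b :: t) ((0 : Nat) : Int) 0)
          (PySem.List.pyGetD (a :: b :: t) (((0 : Nat) : Int) + 1) 0) = g a b := by
        norm_num [PySem.List.pyGetD_natCast]
        congr 1
        rw [PySem.List.pyGetD_ofNat' (a :: b :: t) 1 0]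
        simp
      have htail : List.map ((fun (i : Nat) => g (PySem.List.pyGetD (a :: b :: t) (i : Int) 0)
              (PySem.List.pyGetD (a :: b :: t) ((i : Int) + 1) 0)) ∘ Nat.succ)
            (List.range ((b :: t).length - 1))
          = List.map (fun (i : Nat) => g (PySem.List.pyGetD (b :: t) (i : Int) 0)
              (PySem.List.pyGetD (b :: t) ((i : Int) + 1) 0)) (List.range ((b :: t).length - 1)) := by
        apply List.map_congr_left
        intro i _
        have h2 : ((Nat.succ i : Nat) : Int) = (((i + 1 : Nat) : Nat) : Int) := by push_cast; ring
        have h3 : ((Nat.succ i : Nat) : Int) + 1 = (((i + 2 : Nat) : Nat) : Int) := by push_cast; ring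
        simp only [Function.comp]
        rw [h3, h2]
        simp only [PySem.List.pyGetD_natCast]
        have h4 : ((i : Nat) : Int) + 1 = (((i + 1 : Nat) : Nat) : Int) := by push_cast; ring
        rw [h4]
        simp only [PySem.List.pyGetD_natCast]
        simp
      rw [htail, ih]
      rw [hhead]
      simp

lemma pvL5 {β : Type} (g : Int → Int → β) : ∀ (xs ys : List Int),
    List.zipWith g xs ys = (List.zipWith Prod.mk xs ys).map (fun p => g p.1 p.2) := by
  intro xs
  induction xs with
  | nil => intro ys; simp
  | cons a xs ih =>
    intro ys
    cases ys with
    | nil => simp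
    | cons b ys => simp only [List.zipWith_cons_cons, List.map_cons]; rw [ih]

-- Specialized, beta-reduced instances used for rewriting.
lemma pvL4b (xs : List Int) :
    (List.range (xs.length - 1)).map
        (fun (i : Nat) => if PySem.List.pyGetD xs (i : Int) 0 ≠ PySem.List.pyGetD xs ((i : Int) + 1) 0 then (1 : Int) else 0)
      = List.zipWith (fun a b => if a ≠ b then (1 : Int) else 0) xs xs.tail :=
  pvL4 (fun a b => if a ≠ b then (1 : Int) else 0) xs

lemma pvL4l (m : Int → Int) (xs : List Int) :
    (List.range (xs.length - 1)).map (fun (i : Nat) => m (PySem.List.pyGetD xs (i : Int) 0))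
      = List.zipWith (fun a _ => m a) xs xs.tail := pvL4 (fun a _ => m a) xs

lemma pvL4r (m : Int → Int) (xs : List Int) :
    (List.range (xs.length - 1)).map (fun (i : Nat) => m (PySem.List.pyGetD xs ((i : Int) + 1) 0))
      = List.zipWith (fun _ b => m b) xs xs.tail := pvL4 (fun _ b => m b) xs

lemma pvL5b (xs ys : List Int) :
    List.zipWith (fun a b => if a ≠ b then (1 : Int) else 0) xs ys
      = (List.zipWith Prod.mk xs ys).map (fun p => if p.1 ≠ p.2 then (1 : Int) else 0) :=
  pvL5 (fun a b => if a ≠ b then (1 : Int) else 0) xs ys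

lemma pvL5l (m : Int → Int) (xs ys : List Int) :
    List.zipWith (fun a _ => m a) xs ys
      = (List.zipWith Prod.mk xs ys).map (fun p => m p.1) := pvL5 (fun a _ => m a) xs ys

lemma pvL5r (m : Int → Int) (xs ys : List Int) :
    List.zipWith (fun _ b => m b) xs ys
      = (List.zipWith Prod.mk xs ys).map (fun p => m p.2) := pvL5 (fun _ b => m b) xs ys

lemma pvIdxFrom_cons (k : Int) (w : String) (t : List String) :
    pvIdxFrom k (w :: t) = List.replicate w.toList.length k ++ pvIdxFrom (k + 1) t := rfl

lemma pvL6a (x : Int) : ∀ (m : Nat) (rest : List Int),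
    List.zipWith Prod.mk (List.replicate (m + 1) x ++ rest) ((List.replicate (m + 1) x ++ rest).tail)
      = List.replicate m (x, x) ++
        (match rest with
         | [] => []
         | y :: _ => (x, y) :: List.zipWith Prod.mk rest rest.tail) := by
  intro m
  induction m with
  | zero => intro rest; cases rest <;> simp
  | succ m ih =>
    intro rest
    have hA : List.replicate (m + 1 + 1) x ++ rest = x :: x :: (List.replicate m x ++ rest) := by
      simp [List.replicate_succ]
    have hB : List.replicate (m + 1) x ++ rest = x :: (List.replicate m x ++ rest) := by
      simp [List.replicate_succ]
    rw [hA]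
    have hh := ih rest
    rw [hB] at hh
    simp only [List.tail_cons, List.zipWith_cons_cons] at hh ⊢
    rw [hh]
    simp [List.replicate_succ]

lemma pvL6 : ∀ (ws : List String) (k : Int), (∀ w ∈ ws, w.toList ≠ []) →
    List.zipWith Prod.mk (pvIdxFrom k ws) (pvIdxFrom k ws).tail = pvApGo k ws := by
  intro ws
  induction ws with
  | nil => intro k h; simp [pvIdxFrom, pvApGo]
  | cons w t ih =>
    intro k h
    obtain ⟨nw, hnw⟩ : ∃ n, w.toList.length = n + 1 := by
      cases hw : w.toList with
      | nil => exact absurd hw (h w (by simp))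
      | cons c cs => exact ⟨cs.length, by simp⟩
    rw [pvIdxFrom_cons, hnw, pvL6a]
    cases t with
    | nil =>
      simp [pvIdxFrom, pvApGo, hnw]
    | cons w' t' =>
      obtain ⟨c, cs, hw'⟩ : ∃ c cs, w'.toList = c :: cs := by
        cases hw' : w'.toList with
        | nil => exact absurd hw' (h w' (by simp))
        | cons c cs => exact ⟨c, cs, rfl⟩
      have hrest : pvIdxFrom (k + 1) (w' :: t')
          = (k + 1) :: (List.replicate cs.length (k + 1) ++ pvIdxFrom (k + 1 + 1) t') := by
        rw [pvIdxFrom_cons, hw']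
        simp [List.replicate_succ]
      rw [hrest, ← hrest]
      rw [ih (k + 1) (fun v hv => h v (by simp [hv]))]
      simp only [pvApGo, hnw]
      rw [hrest]
      simp

-- Mapping boundary/length extractors over the adjacent-pair blocks yields B's block lists.
lemma pvL7b (m : Int → Int) : ∀ (t : List String) (w' : String) (k : Int),
    (∀ (j : Nat) (h : j < (w' :: t).length), m (k + 1 + j) = (((w' :: t)[j]).toList.length : Int)) →
    (∀ w ∈ w' :: t, w.toList ≠ []) →
    ((((k, k + 1) :: pvApGo (k + 1) (w' :: t)).map (fun p => if p.1 ≠ p.2 then (1 : Int) else 0),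
      ((k, k + 1) :: pvApGo (k + 1) (w' :: t)).map (fun p => m p.1),
      ((k, k + 1) :: pvApGo (k + 1) (w' :: t)).map (fun p => m p.2)))
      = pvBl (m k) (w' :: t) := by
  intro t
  induction t with
  | nil =>
    intro w' k hm hne
    obtain ⟨n, hn⟩ : ∃ n, w'.toList.length = n + 1 := by
      cases hw : w'.toList with
      | nil => exact absurd hw (hne w' (by simp))
      | cons c cs => exact ⟨cs.length, by simp⟩
    have h0 : m (k + 1) = (w'.toList.length : Int) := by
      have := hm 0 (by simp)
      simpa using this
    simp only [pvApGo, pvBl, hn]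
    simp [h0, hn, List.replicate_succ]
  | cons w'' t' ih =>
    intro w' k hm hne
    obtain ⟨n, hn⟩ : ∃ n, w'.toList.length = n + 1 := by
      cases hw : w'.toList with
      | nil => exact absurd hw (hne w' (by simp))
      | cons c cs => exact ⟨cs.length, by simp⟩
    have h0 : m (k + 1) = (w'.toList.length : Int) := by
      have := hm 0 (by simp)
      simpa using this
    have hm' : ∀ (j : Nat) (h : j < (w'' :: t').length), m (k + 1 + 1 + j) = (((w'' :: t')[j]).toList.length : Int) := by
      intro j hj
      have := hm (j + 1) (by simpa using hj)
      rw [show k + 1 + (↑(j + 1) : Int) = k + 1 + 1 + j by push_cast; ring] at this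
      simpa using this
    have hih := ih w'' (k + 1) hm' (fun v hv => hne v (by simp at hv ⊢; tauto))
    simp only [pvApGo]
    simp only [List.map_cons, List.map_append, List.map_replicate]
    have e1 : (if (k : Int) ≠ k + 1 then (1 : Int) else 0) = 1 := by norm_num
    have e2 : (if (k + 1 : Int) ≠ k + 1 then (1 : Int) else 0) = 0 := by norm_num
    simp only [e1, e2]
    have h1 := congrArg (fun x : List Int × List Int × List Int => x.1) hih
    have h2 := congrArg (fun x : List Int × List Int × List Int => x.2.1) hih
    have h3 := congrArg (fun x : List Int × List Int × List Int => x.2.2) hih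
    simp only [pvApGo, List.map_cons, List.map_append, List.map_replicate] at h1 h2 h3
    simp only [pvBl, hn]
    simp [pvBl] at h1 h2 h3 ⊢
    refine ⟨?_, ?_, ?_⟩
    · rw [← h1]
    · rw [← h2]; simp [h0, hn]
    · rw [← h3]; simp [h0, hn, List.replicate_succ]

lemma pvApGo_cons_cons (k : Int) (w w' : String) (t' : List String) :
    pvApGo k (w :: w' :: t') = List.replicate (w.toList.length - 1) (k, k) ++
      (k, k + 1) :: pvApGo (k + 1) (w' :: t') := rfl

lemma pvTop_cons (w : String) (t : List String) :
    pvTop (w :: t) = (List.replicate (w.toList.length - 1) 0 ++ (pvBl w.toList.length t).1,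
      List.replicate (w.toList.length - 1) (w.toList.length : Int) ++ (pvBl w.toList.length t).2.1,
      List.replicate (w.toList.length - 1) (w.toList.length : Int) ++ (pvBl w.toList.length t).2.2) := rfl

lemma pvL7 (m : Int → Int) (ws : List String) (k : Int)
    (hm : ∀ (j : Nat) (h : j < ws.length), m (k + j) = ((ws[j]).toList.length : Int))
    (hne : ∀ w ∈ ws, w.toList ≠ []) :
    (((pvApGo k ws).map (fun p => if p.1 ≠ p.2 then (1 : Int) else 0),
      (pvApGo k ws).map (fun p => m p.1),
      (pvApGo k ws).map (fun p => m p.2)))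
      = pvTop ws := by
  cases ws with
  | nil => simp [pvApGo, pvTop]
  | cons w t =>
    have h0 : m k = (w.toList.length : Int) := by
      have := hm 0 (by simp)
      simpa using this
    cases t with
    | nil =>
      simp [pvApGo, pvTop, pvBl, h0]
    | cons w' t' =>
      have hm' : ∀ (j : Nat) (h : j < (w' :: t').length), m (k + 1 + j) = (((w' :: t')[j]).toList.length : Int) := by
        intro j hj
        have := hm (j + 1) (by simpa using hj)
        rw [show k + (↑(j + 1) : Int) = k + 1 + j by push_cast; ring] at this
        simpa using this
      have hih := pvL7b m t' w' k hm' (fun v hv => hne v (by simp at hv ⊢; tauto))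
      rw [pvApGo_cons_cons, pvTop_cons]
      simp only [List.map_append, List.map_replicate]
      rw [← h0, ← hih]
      have e0 : (if (k : Int) ≠ k then (1 : Int) else 0) = 0 := by norm_num
      simp [e0]

-- A's output in canonical form.
lemma pvAcanon (lk : Char → Int) (ws : List String) (hne : ∀ w ∈ ws, w.toList ≠ []) :
    pvAfun lk ws = (pvIdsOf lk ws, (pvTop ws).1, (pvTop ws).2.1, (pvTop ws).2.2) := by
  have hp : (PySem.List.enumerate ws).foldl (pvOuterA lk) ([], [])
      = (pvIdsOf lk ws, pvIdxFrom 0 ws) := by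
    simpa using pvL2 lk ws 0 ([], [])
  set m : Int → Int := fun a => PySem.List.pyGetD (ws.map (fun w => (PySem.Str.len w : Int))) a 0 with hmdef
  have hm : ∀ (j : Nat) (h : j < ws.length), m ((0 : Int) + j) = ((ws[j]).toList.length : Int) := by
    intro j hj
    show PySem.List.pyGetD _ ((0 : Int) + j) 0 = _
    rw [show ((0 : Int) + (j : Int)) = ((j : Nat) : Int) by ring, PySem.List.pyGetD_natCast]
    rw [List.getD_eq_getElem _ _ (by simpa using hj)]
    simp [PySem.Str.len]
  have h7 := pvL7 m ws 0 hm hne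
  have h6 := pvL6 ws 0 hne
  have h71 := congrArg (fun x : List Int × List Int × List Int => x.1) h7
  have h72 := congrArg (fun x : List Int × List Int × List Int => x.2.1) h7
  have h73 := congrArg (fun x : List Int × List Int × List Int => x.2.2) h7
  simp only [] at h71 h72 h73
  unfold pvAfun
  rw [hp]
  simp only []
  have hlen : (pvIdsOf lk ws).length - 1 = (pvIdxFrom 0 ws).length - 1 := by rw [pvL3 lk]
  rw [hlen]
  rw [pvL4b, pvL4l m, pvL4r m, pvL5b, pvL5l m, pvL5r m, h6, h71, h72, h73]

-- B's inner loop on the non-first characters of a word.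
lemma pvL8 (lk : Char → Int) (L prev wi : Int) : ∀ (cs : List Char) (s : Int), 1 ≤ s →
    ∀ (o : List Int × List Int × List Int × List Int),
    (PySem.List.enumerate cs s).foldl (pvInnerB lk L prev wi) o
      = (o.1 ++ cs.map lk, o.2.1 ++ List.replicate cs.length 0,
         o.2.2.1 ++ List.replicate cs.length L, o.2.2.2 ++ List.replicate cs.length L) := by
  intro cs
  induction cs with
  | nil => intro s hs o; simp [PySem.List.enumerate_nil]
  | cons c cs ih =>
    intro s hs o
    rw [PySem.List.enumerate_cons, List.foldl_cons]
    rw [show pvInnerB lk L prev wi o (s, c)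
        = (o.1 ++ [lk c], o.2.1 ++ [0], o.2.2.1 ++ [L], o.2.2.2 ++ [L]) by
      simp [pvInnerB]; omega]
    rw [ih (s + 1) (by omega)]
    simp [List.replicate_succ]

lemma pvL9a (lk : Char → Int) (L prev : Int) (c : Char) (rest : List Char)
    (o : List Int × List Int × List Int × List Int) :
    (PySem.List.enumerate (c :: rest) 0).foldl (pvInnerB lk L prev 0) o
      = (o.1 ++ (c :: rest).map lk, o.2.1 ++ List.replicate rest.length 0,
         o.2.2.1 ++ List.replicate rest.length L, o.2.2.2 ++ List.replicate rest.length L) := by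
  rw [PySem.List.enumerate_cons, List.foldl_cons]
  rw [show pvInnerB lk L prev 0 o ((0 : Int), c) = (o.1 ++ [lk c], o.2.1, o.2.2.1, o.2.2.2) by
    simp [pvInnerB]]
  simp only [zero_add]
  rw [pvL8 lk L prev 0 rest 1 (by omega)]
  simp

lemma pvL9b (lk : Char → Int) (L prev wi : Int) (hwi : 1 ≤ wi) (c : Char) (rest : List Char)
    (o : List Int × List Int × List Int × List Int) :
    (PySem.List.enumerate (c :: rest) 0).foldl (pvInnerB lk L prev wi) o
      = (o.1 ++ (c :: rest).map lk, o.2.1 ++ 1 :: List.replicate rest.length 0,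
         o.2.2.1 ++ prev :: List.replicate rest.length L, o.2.2.2 ++ L :: List.replicate rest.length L) := by
  rw [PySem.List.enumerate_cons, List.foldl_cons]
  rw [show pvInnerB lk L prev wi o ((0 : Int), c)
      = (o.1 ++ [lk c], o.2.1 ++ [1], o.2.2.1 ++ [prev], o.2.2.2 ++ [L]) by
    simp [pvInnerB]; omega]
  simp only [zero_add]
  rw [pvL8 lk L prev wi rest 1 (by omega)]
  simp

-- B's outer loop over the non-first words.
lemma pvL10 (lk : Char → Int) : ∀ (t : List String) (wi : Int), 1 ≤ wi →
    (∀ w ∈ t, w.toList ≠ []) →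
    ∀ (acc : List Int × List Int × List Int × List Int) (prev : Int),
    (PySem.List.enumerate t wi).foldl (pvOuterB lk) (acc, prev)
      = ((acc.1 ++ pvIdsOf lk t, acc.2.1 ++ (pvBl prev t).1,
          acc.2.2.1 ++ (pvBl prev t).2.1, acc.2.2.2 ++ (pvBl prev t).2.2), pvLast prev t) := by
  intro t
  induction t with
  | nil =>
    intro wi hwi hne acc prev
    simp [PySem.List.enumerate_nil, pvIdsOf, pvBl, pvLast]
  | cons w t ih =>
    intro wi hwi hne acc prev
    obtain ⟨c, rest, hw⟩ : ∃ c rest, w.toList = c :: rest := by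
      cases hw : w.toList with
      | nil => exact absurd hw (hne w (by simp))
      | cons c cs => exact ⟨c, cs, rfl⟩
    rw [PySem.List.enumerate_cons, List.foldl_cons]
    have hL : (PySem.Str.len w : Int) = (w.toList.length : Int) := by
      simp [PySem.Str.len]
    rw [show pvOuterB lk (acc, prev) (wi, w)
        = ((acc.1 ++ w.toList.map lk, acc.2.1 ++ 1 :: List.replicate (w.toList.length - 1) 0,
            acc.2.2.1 ++ prev :: List.replicate (w.toList.length - 1) (w.toList.length : Int),
            acc.2.2.2 ++ (w.toList.length : Int) :: List.replicate (w.toList.length - 1) (w.toList.length : Int)),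
           (w.toList.length : Int)) by
      show ((PySem.List.enumerate w.toList 0).foldl (pvInnerB lk (PySem.Str.len w) prev wi) acc, (PySem.Str.len w : Int)) = _
      rw [hL]
      conv_lhs => rw [hw]
      rw [pvL9b lk _ prev wi hwi c rest acc]
      simp [hw]]
    rw [ih (wi + 1) (by omega) (fun v hv => hne v (by simp [hv])) _ _]
    simp [pvIdsOf, pvBl, pvLast, hw, List.replicate_succ]

-- B's output in canonical form.
lemma pvBcanon (lk : Char → Int) (ws : List String) (hne : ∀ w ∈ ws, w.toList ≠ []) :
    pvBfun lk ws = (pvIdsOf lk ws, (pvTop ws).1, (pvTop ws).2.1, (pvTop ws).2.2) := by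
  cases ws with
  | nil => simp [pvBfun, pvIdsOf, pvTop, PySem.List.enumerate_nil]
  | cons w t =>
    obtain ⟨c, rest, hw⟩ : ∃ c rest, w.toList = c :: rest := by
      cases hw : w.toList with
      | nil => exact absurd hw (hne w (by simp))
      | cons c cs => exact ⟨c, cs, rfl⟩
    unfold pvBfun
    rw [PySem.List.enumerate_cons, List.foldl_cons]
    have hL : (PySem.Str.len w : Int) = (w.toList.length : Int) := by
      simp [PySem.Str.len]
    have hstep : pvOuterB lk (([], [], [], []), 0) ((0 : Int), w)
        = ((w.toList.map lk, List.replicate rest.length 0,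
            List.replicate rest.length (w.toList.length : Int),
            List.replicate rest.length (w.toList.length : Int)), (w.toList.length : Int)) := by
      show ((PySem.List.enumerate w.toList 0).foldl (pvInnerB lk (PySem.Str.len w) 0 0) ([], [], [], []), (PySem.Str.len w : Int)) = _
      rw [hL]
      conv_lhs => rw [hw]
      rw [pvL9a]
      simp [hw]
    rw [hstep]
    simp only [zero_add]
    rw [pvL10 lk t 1 (by omega) (fun v hv => hne v (by simp [hv])) _ _]
    simp only [pvIdsOf, pvTop, pvBl]
    simp [hw]

lemma pv_main (lk : Char → Int) (ws : List String) (hne : ∀ w ∈ ws, w.toList ≠ []) :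
    pvAfun lk ws = pvBfun lk ws :=
  (pvAcanon lk ws hne).trans (pvBcanon lk ws hne).symm

-- ===== VERDICT (by name: the statement is the Claim_ definition above) =====
theorem strip_and_label_py_spec : Claim_equal_strip_and_label_py := by
  intro text vocab _
  unfold Spec_strip_and_label_py
  have hA : strip_and_label_py text vocab
      = pvAfun (fun c => (PySem.Dict.ofList vocab).getD (String.ofList [c]) 0)
          (PySem.Str.split₀ (PySem.Str.replace text "\n" " ")) := rfl
  have hB : strip_and_label_py_alt text vocab
      = pvBfun (fun c => (PySem.Dict.ofList vocab).getD (String.ofList [c]) 0)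
          (PySem.Str.split₀ (PySem.Str.replace text "\n" " ")) := rfl
  rw [hA, hB]
  exact pv_main _ _ (pv_split0_ne_nil _)
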